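-- pv_equiv track=rewrite | github.com/MarcosBianchii/Teoria-de-Algoritmos | guias/reducciones/14.py | validador_carlitos
-- ===== SOURCE A (Python) =====
-- def validador_carlitos(figuritas, w, k, elegidas):
--     """
--     La complejidad del verificador es O(n)
--     """
--     # O(n)
--     if any(f not in figuritas for f in elegidas):
--         return False
--
--     if len(elegidas) > k:
--         return False
--
--     # O(n)
--     if sum(elegidas) != w:
--         return False
--
--     return True
-- ===== SOURCE B (Python) =====
-- def validador_carlitos(figuritas, w, k, elegidas):
--     # Divide and conquer: recursively split the index range in half and combine
--     # (all-members, count, total) triples; O(log n) recursion depth.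
--     def scan(lo, hi):
--         if lo >= hi:
--             return (True, 0, 0)
--         if hi - lo == 1:
--             f = elegidas[lo]
--             return (f in figuritas, 1, f)
--         mid = (lo + hi) // 2
--         ok1, c1, s1 = scan(lo, mid)
--         ok2, c2, s2 = scan(mid, hi)
--         return (ok1 and ok2, c1 + c2, s1 + s2)
--     ok, cnt, tot = scan(0, len(elegidas))
--     return ok and cnt <= k and tot == w
-- ===== Notes on version B (the rewrite author's own statement) =====
-- stated objective: alternative
-- what changed: Replaces A's three staged whole-list passes (any-membership generator, len>k, sum!=w with early returns) by a divide-and-conquer recursion that splits the index range in half and combines (all-members, count, total) triples, deciding everything in one final conjunction.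
import Mathlib
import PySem

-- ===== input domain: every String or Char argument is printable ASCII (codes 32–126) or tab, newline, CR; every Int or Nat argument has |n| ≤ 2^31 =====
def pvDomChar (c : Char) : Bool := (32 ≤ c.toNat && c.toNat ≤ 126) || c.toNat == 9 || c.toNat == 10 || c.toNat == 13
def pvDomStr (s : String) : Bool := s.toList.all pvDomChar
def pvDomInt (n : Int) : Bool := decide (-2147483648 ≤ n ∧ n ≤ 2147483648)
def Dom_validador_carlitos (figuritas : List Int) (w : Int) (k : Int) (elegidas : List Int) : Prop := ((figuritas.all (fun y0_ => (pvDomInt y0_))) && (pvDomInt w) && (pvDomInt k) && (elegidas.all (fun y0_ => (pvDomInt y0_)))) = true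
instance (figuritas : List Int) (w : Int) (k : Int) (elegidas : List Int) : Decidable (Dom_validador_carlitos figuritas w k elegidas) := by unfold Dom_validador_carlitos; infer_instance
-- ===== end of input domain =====

-- B replaces A's three staged linear passes by a divide-and-conquer recursion combining
-- (all-members, count, total) triples over halves of the index range; objective: alternative.

-- ===== PORT A =====
def validador_carlitos (figuritas : List Int) (w : Int) (k : Int) (elegidas : List Int) : Bool :=
  if elegidas.any (fun f => !(figuritas.contains f)) then false
  else if (elegidas.length : Int) > k then false
  else if elegidas.foldl (· + ·) 0 ≠ w then false
  else true

-- ===== PORT B =====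
-- scan(lo, hi): divide-and-conquer over the index range, returning (all-members, count, total).
-- elegidas[lo] with 0 ≤ lo < len is in range, so List.getD is exact; the fuel argument (hi - lo at
-- the top call) only makes Python's halving recursion structural in Lean and never runs out: each
-- half of a range of length ≥ 2 is strictly shorter.
def vcScanF (figuritas elegidas : List Int) : Nat → Nat → Nat → Bool × Int × Int
  | fuel, lo, hi =>
    if lo ≥ hi then (true, 0, 0)
    else if hi - lo = 1 then
      (figuritas.contains (elegidas.getD lo 0), 1, elegidas.getD lo 0)
    else
      match fuel with
      | 0 => (true, 0, 0)  -- unreachable: fuel = hi - lo ≥ 2 at every call that reaches here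
      | fuel + 1 =>
        (fun r1 r2 => (r1.1 && r2.1, r1.2.1 + r2.2.1, r1.2.2 + r2.2.2))
          (vcScanF figuritas elegidas fuel lo ((lo + hi) / 2))
          (vcScanF figuritas elegidas fuel ((lo + hi) / 2) hi)

def vcScan (figuritas elegidas : List Int) (lo hi : Nat) : Bool × Int × Int :=
  vcScanF figuritas elegidas (hi - lo) lo hi

def validador_carlitos_alt (figuritas : List Int) (w : Int) (k : Int) (elegidas : List Int) : Bool :=
  let (ok, cnt, tot) := vcScan figuritas elegidas 0 elegidas.length
  ok && decide (cnt ≤ k) && decide (tot = w)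

-- ===== PRECONDITION & SPEC =====
def Spec_validador_carlitos (figuritas : List Int) (w : Int) (k : Int) (elegidas : List Int) (out : Bool) : Prop := out = validador_carlitos_alt figuritas w k elegidas
instance (figuritas : List Int) (w : Int) (k : Int) (elegidas : List Int) (out : Bool) : Decidable (Spec_validador_carlitos figuritas w k elegidas out) := by unfold Spec_validador_carlitos; infer_instance

-- ===== CLAIM (what is proved, stated in full; the proofs are below) =====
def Claim_equal_validador_carlitos : Prop := ∀ (figuritas : List Int) (w : Int) (k : Int) (elegidas : List Int), Dom_validador_carlitos figuritas w k elegidas → Spec_validador_carlitos figuritas w k elegidas (validador_carlitos figuritas w k elegidas)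

-- ===== LEMMAS AND PROOFS =====
theorem extract_split (l : List Int) (lo mid hi : Nat) (h1 : lo ≤ mid) (h2 : mid ≤ hi) :
    l.extract lo hi = l.extract lo mid ++ l.extract mid hi := by
  rw [List.extract_eq_take_drop, List.extract_eq_take_drop, List.extract_eq_take_drop]
  have h : hi - lo = (mid - lo) + (hi - mid) := by omega
  rw [h, List.take_add, List.drop_drop]
  congr 3
  omega

theorem vcScanF_eq (figuritas elegidas : List Int) :
    ∀ fuel lo hi, hi - lo ≤ fuel → hi ≤ elegidas.length →
      vcScanF figuritas elegidas fuel lo hi =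
        ((elegidas.extract lo hi).all (figuritas.contains ·),
         ((elegidas.extract lo hi).length : Int),
         (elegidas.extract lo hi).sum) := by
  intro fuel
  induction fuel with
  | zero =>
    intro lo hi hf hle
    have h0 : lo ≥ hi := by omega
    have hx : elegidas.extract lo hi = [] := by
      rw [List.extract_eq_take_drop]
      have h00 : hi - lo = 0 := by omega
      simp [h00]
    rw [vcScanF]
    simp [h0, hx]
  | succ n ih =>
    intro lo hi hf hle
    rw [vcScanF]
    by_cases h0 : lo ≥ hi
    · have hx : elegidas.extract lo hi = [] := by
        rw [List.extract_eq_take_drop]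
        have h00 : hi - lo = 0 := by omega
        simp [h00]
      simp [h0, hx]
    · by_cases h1 : hi - lo = 1
      · have hlt : lo < elegidas.length := by omega
        have hx : elegidas.extract lo hi = [elegidas[lo]] := by
          rw [List.extract_eq_take_drop, h1, List.take_one_drop_eq_of_lt_length hlt]
          simp
        simp [h0, h1, hx, List.getD, List.getElem?_eq_getElem hlt]
      · simp only [if_neg h0, if_neg h1]
        rw [ih lo ((lo + hi) / 2) (by omega) (by omega),
            ih ((lo + hi) / 2) hi (by omega) hle]
        rw [extract_split elegidas lo ((lo + hi) / 2) hi (by omega) (by omega)]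
        simp [List.all_append, List.sum_append]

theorem vcScan_full (figuritas elegidas : List Int) :
    vcScan figuritas elegidas 0 elegidas.length =
      (elegidas.all (figuritas.contains ·), (elegidas.length : Int), elegidas.sum) := by
  rw [vcScan, vcScanF_eq figuritas elegidas (elegidas.length - 0) 0 elegidas.length (by omega) (le_refl _)]
  simp [List.extract_eq_take_drop]

theorem foldl_add_sum (el : List Int) : ∀ t : Int, el.foldl (· + ·) t = t + el.sum := by
  induction el with
  | nil => simp
  | cons x xs ih => intro t; simp [List.foldl_cons, ih, List.sum_cons]; ring

theorem any_not_contains (figuritas elegidas : List Int) :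
    (elegidas.any fun f => !figuritas.contains f) = !(elegidas.all (figuritas.contains ·)) := by
  induction elegidas with
  | nil => rfl
  | cons a l ih => simp only [List.any_cons, List.all_cons, ih, Bool.not_and]

-- ===== VERDICT (by name: the statement is the Claim_ definition above) =====
theorem validador_carlitos_spec : Claim_equal_validador_carlitos := by
  intro figuritas w k elegidas _
  unfold Spec_validador_carlitos validador_carlitos validador_carlitos_alt
  rw [vcScan_full, foldl_add_sum, any_not_contains]
  cases hall : elegidas.all (figuritas.contains ·) with
  | false => simp
  | true =>
    by_cases hk : (elegidas.length : Int) > k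
    · simp [hk, not_le.mpr hk]
    · by_cases hw : elegidas.sum = w <;> simp [hk, hw, not_lt.mp hk]
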